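-- pv_equiv track=rewrite | github.com/mjenrungrot/autolab | tests/test_scaffold_verifiers.py | _extract_task_example_sections
-- ===== SOURCE A (Python) =====
-- def _extract_task_example_sections(prompt_text: str) -> list[str]:
--     lines = prompt_text.splitlines()
--     sections: list[str] = []
--     idx = 0
--     while idx < len(lines):
--         line = lines[idx].strip()
--         if not line.startswith("### T"):
--             idx += 1
--             continue
--         end = idx + 1
--         while end < len(lines):
--             candidate = lines[end].strip()
--             if candidate.startswith("### T") or candidate.startswith("## "):
--                 break
--             end += 1
--         sections.append("\n".join(lines[idx:end]))
--         idx = end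
--     return sections
-- ===== SOURCE B (Python) =====
-- def _extract_task_example_sections(prompt_text: str) -> list[str]:
--     sections: list[str] = []
--     current = None
--     for line in prompt_text.splitlines():
--         stripped = line.strip()
--         if stripped.startswith("### T"):
--             if current is not None:
--                 sections.append("\n".join(current))
--             current = [line]
--         elif current is not None:
--             if stripped.startswith("## "):
--                 sections.append("\n".join(current))
--                 current = None
--             else:
--                 current.append(line)
--     if current is not None:
--         sections.append("\n".join(current))
--     return sections
-- ===== Notes on version B (the rewrite author's own statement) =====
-- stated objective: simpler
-- what changed: Replaces A's index-based outer while loop with a nested boundary-scanning inner while (and list slicing/joining) by a single forward pass over the lines maintaining an optional current-section accumulator that is flushed at boundaries and at the end.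
import Mathlib
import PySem

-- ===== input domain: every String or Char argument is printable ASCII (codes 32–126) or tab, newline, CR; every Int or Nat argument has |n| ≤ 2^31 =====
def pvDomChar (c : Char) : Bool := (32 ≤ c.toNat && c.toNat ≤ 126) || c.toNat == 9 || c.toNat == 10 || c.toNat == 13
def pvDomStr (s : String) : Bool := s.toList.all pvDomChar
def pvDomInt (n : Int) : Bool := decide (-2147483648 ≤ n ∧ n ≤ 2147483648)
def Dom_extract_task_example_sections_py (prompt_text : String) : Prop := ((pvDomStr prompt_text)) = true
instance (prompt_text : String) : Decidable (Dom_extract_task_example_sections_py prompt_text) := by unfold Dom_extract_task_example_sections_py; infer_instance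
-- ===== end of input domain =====

-- B changes only the decomposition (one pass with an accumulator instead of A's nested index scans); same output.

-- ===== PORT A =====
-- A's inner while loop: advance `end` until a line whose strip starts with "### T" or "## ";
-- returns (lines[idx+1:end], lines[end:]).
def pvTakeA : List String → List String × List String
  | [] => ([], [])
  | l :: rest =>
    if PySem.Str.startswith (PySem.Str.strip l) "### T"
        || PySem.Str.startswith (PySem.Str.strip l) "## " then ([], l :: rest)
    else ((l :: (pvTakeA rest).1), (pvTakeA rest).2)

-- needed by pvLoopA's termination proof
theorem pvTakeA_snd_le (xs : List String) : (pvTakeA xs).2.length ≤ xs.length := by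
  induction xs with
  | nil => simp [pvTakeA]
  | cons l rest ih =>
    simp only [pvTakeA]
    split
    · simp
    · simpa using Nat.le_succ_of_le ih

-- A's outer while loop over idx, as structural recursion on the remaining lines.
def pvLoopA : List String → List String
  | [] => []
  | l :: rest =>
    if PySem.Str.startswith (PySem.Str.strip l) "### T" then
      PySem.Str.join "\n" (l :: (pvTakeA rest).1) :: pvLoopA (pvTakeA rest).2
    else pvLoopA rest
termination_by lines => lines.length
decreasing_by
  · have := pvTakeA_snd_le rest; simp; omega
  · simp

def extract_task_example_sections_py (prompt_text : String) : List String :=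
  pvLoopA (PySem.Str.splitlines prompt_text)

-- ===== PORT B =====
-- one step of B's for-loop: state = (sections so far, optional current accumulator)
def pvStepB (st : List String × Option (List String)) (line : String) : List String × Option (List String) :=
  let stripped := PySem.Str.strip line
  if PySem.Str.startswith stripped "### T" then
    (match st.2 with
      | some cur => st.1 ++ [PySem.Str.join "\n" cur]
      | none => st.1,
     some [line])
  else
    match st.2 with
    | none => st
    | some cur =>
      if PySem.Str.startswith stripped "## " then (st.1 ++ [PySem.Str.join "\n" cur], none)
      else (st.1, some (cur ++ [line]))

def extract_task_example_sections_py_alt (prompt_text : String) : List String :=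
  let st := (PySem.Str.splitlines prompt_text).foldl pvStepB ([], none)
  match st.2 with
  | some cur => st.1 ++ [PySem.Str.join "\n" cur]
  | none => st.1

-- ===== PRECONDITION & SPEC =====
def Spec_extract_task_example_sections_py (prompt_text : String) (out : List String) : Prop := out = extract_task_example_sections_py_alt prompt_text
instance (prompt_text : String) (out : List String) : Decidable (Spec_extract_task_example_sections_py prompt_text out) := by unfold Spec_extract_task_example_sections_py; infer_instance

-- ===== CLAIM (what is proved, stated in full; the proofs are below) =====
def Claim_equal_extract_task_example_sections_py : Prop := ∀ (prompt_text : String), Dom_extract_task_example_sections_py prompt_text → Spec_extract_task_example_sections_py prompt_text (extract_task_example_sections_py prompt_text)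

-- ===== LEMMAS AND PROOFS =====

-- remaining output of B's loop from state cur, including the final flush
def pvBOut : List String → Option (List String) → List String
  | [], none => []
  | [], some cur => [PySem.Str.join "\n" cur]
  | l :: rest, cur =>
    let stripped := PySem.Str.strip l
    if PySem.Str.startswith stripped "### T" then
      (match cur with
        | some c => [PySem.Str.join "\n" c]
        | none => []) ++ pvBOut rest (some [l])
    else
      match cur with
      | none => pvBOut rest none
      | some c =>
        if PySem.Str.startswith stripped "## " then PySem.Str.join "\n" c :: pvBOut rest none
        else pvBOut rest (some (c ++ [l]))

theorem pvFoldB_eq (lines : List String) : ∀ (secs : List String) (cur : Option (List String)),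
    (match (lines.foldl pvStepB (secs, cur)).2 with
      | some c => (lines.foldl pvStepB (secs, cur)).1 ++ [PySem.Str.join "\n" c]
      | none => (lines.foldl pvStepB (secs, cur)).1)
    = secs ++ pvBOut lines cur := by
  induction lines with
  | nil =>
    intro secs cur
    cases cur <;> simp [pvBOut]
  | cons l rest ih =>
    intro secs cur
    simp only [List.foldl_cons, pvStepB, pvBOut]
    by_cases h1 : PySem.Chars.startswith (PySem.Chars.strip l.toList) (['#', '#', '#', ' ', 'T'] : List Char) = true
    · cases cur <;> simp [h1, ih]
    · cases cur with
      | none => simp [h1, ih]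
      | some c =>
        by_cases h2 : PySem.Chars.startswith (PySem.Chars.strip l.toList) (['#', '#', ' '] : List Char) = true
        · simp [h1, h2, ih]
        · simp [h1, h2, ih]

theorem pvBOut_eq_loopA (lines : List String) :
    pvBOut lines none = pvLoopA lines ∧
    ∀ acc, pvBOut lines (some acc)
      = PySem.Str.join "\n" (acc ++ (pvTakeA lines).1) :: pvLoopA (pvTakeA lines).2 := by
  induction lines with
  | nil =>
    refine ⟨by simp [pvBOut, pvLoopA], fun acc => ?_⟩
    simp [pvBOut, pvLoopA, pvTakeA]
  | cons l rest ih =>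
    by_cases h1 : PySem.Chars.startswith (PySem.Chars.strip l.toList) (['#', '#', '#', ' ', 'T'] : List Char) = true
    · refine ⟨?_, fun acc => ?_⟩
      · simp [pvBOut, pvLoopA, h1, ih.2 [l]]
      · simp [pvBOut, pvLoopA, pvTakeA, h1, ih.2 [l]]
    · by_cases h2 : PySem.Chars.startswith (PySem.Chars.strip l.toList) (['#', '#', ' '] : List Char) = true
      · refine ⟨?_, fun acc => ?_⟩
        · simp [pvBOut, pvLoopA, h1, ih.1]
        · simp [pvBOut, pvLoopA, pvTakeA, h1, h2, ih.1]
      · refine ⟨?_, fun acc => ?_⟩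
        · simp [pvBOut, pvLoopA, h1, ih.1]
        · simp [pvBOut, pvTakeA, h1, h2, ih.2 (acc ++ [l])]

-- ===== VERDICT (by name: the statement is the Claim_ definition above) =====
theorem extract_task_example_sections_py_spec : Claim_equal_extract_task_example_sections_py := by
  intro prompt_text _
  unfold Spec_extract_task_example_sections_py extract_task_example_sections_py extract_task_example_sections_py_alt
  have h := pvFoldB_eq (PySem.Str.splitlines prompt_text) [] none
  simp only [List.nil_append] at h
  rw [(pvBOut_eq_loopA _).1] at h
  exact h.symm
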